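-- pv_equiv track=rewrite | github.com/ckf42/leetcode-code | sol/2122/2122.py | recoverArray
-- ===== SOURCE A (Python) =====
-- from typing import List
--
-- from collections import defaultdict
--
-- def recoverArray(nums: List[int]) -> List[int]:
--     n = len(nums)
--     nums.sort()
--     indices = defaultdict(list)
--     for i, x in enumerate(nums):
--         indices[x].append(i)
--     for i in range(1, n):
--         if nums[i] == nums[0] or ((nums[i] - nums[0]) & 1) != 0:
--             continue
--         k = (nums[i] - nums[0]) >> 1
--         paired = [False] * n
--         paired[0] = paired[i] = True
--         res = [nums[0] + k]
--         for j in range(1, n):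
--             if paired[j]:
--                 continue
--             for idx in indices[nums[j] + 2 * k]:
--                 if not paired[idx]:
--                     res.append(nums[j] + k)
--                     paired[j] = paired[idx] = True
--                     break
--             else:
--                 break
--         else:
--             return res
--     return []
-- ===== SOURCE B (Python) =====
-- from typing import List
--
-- def recoverArray(nums: List[int]) -> List[int]:
--     # Same candidate loop as the statement suggests, but the matching pass
--     # consumes a working copy of the sorted list directly: pop the smallest
--     # remaining element and remove its required partner, no index bookkeeping.
--     nums.sort()
--     if not nums:
--         return []
--     base = nums[0]
--     for x in nums[1:]:
--         d = x - base
--         if d <= 0 or d % 2 != 0: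
--             continue
--         k = d // 2
--         rest = nums[:]
--         res = []
--         ok = True
--         while rest:
--             a = rest.pop(0)
--             try:
--                 rest.remove(a + d)
--             except ValueError:
--                 ok = False
--                 break
--             res.append(a + k)
--         if ok:
--             return res
--     return []
-- ===== Notes on version B (the rewrite author's own statement) =====
-- stated objective: simpler
-- what changed: A builds a value-to-indices dictionary plus a paired boolean array and scans index lists to match partners; B drops all index bookkeeping and, for each candidate difference, consumes a working copy of the sorted list directly (pop the smallest remaining element, remove its partner value).
import Mathlib
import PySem

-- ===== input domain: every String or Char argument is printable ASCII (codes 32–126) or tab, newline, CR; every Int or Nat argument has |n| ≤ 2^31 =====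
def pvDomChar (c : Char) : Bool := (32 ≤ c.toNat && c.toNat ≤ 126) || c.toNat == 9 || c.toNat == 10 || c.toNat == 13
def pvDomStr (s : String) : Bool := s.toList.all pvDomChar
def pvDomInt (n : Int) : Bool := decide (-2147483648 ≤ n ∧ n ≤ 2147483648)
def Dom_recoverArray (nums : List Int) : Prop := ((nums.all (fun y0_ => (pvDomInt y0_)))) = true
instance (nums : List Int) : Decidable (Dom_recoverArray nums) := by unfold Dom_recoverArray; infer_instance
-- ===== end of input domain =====

-- B replaces A's index-dictionary and paired-boolean bookkeeping by consuming a sorted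
-- working copy directly (pop the smallest remaining element, remove its partner value):
-- simpler, same return value. Both Pythons sort the argument in place; the equivalence
-- proved here is about the return value (the mutation is identical anyway).

-- ===== PORT A =====

-- in-range list access with default (every index A builds is in range, so this is exact)
def pvIdx (l : List Int) (i : Int) : Int := (PySem.List.pyGet? l i).getD 0
def pvGetB (l : List Bool) (i : Int) : Bool := (PySem.List.pyGet? l i).getD false

-- indices = defaultdict(list); for i, x in enumerate(nums): indices[x].append(i)
def buildIndices (s : List Int) : PySem.Dict Int (List Int) :=
  (PySem.List.enumerate s 0).foldl (fun d p => d.modify p.2 [] (fun l => l ++ [p.1])) PySem.Dict.empty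

-- 'for idx in indices[…]: if not paired[idx]: …; break / else: break'
def firstUnpaired (idxs : List Int) (paired : List Bool) : Option Int :=
  match idxs with
  | [] => none
  | idx :: rest => if pvGetB paired idx then firstUnpaired rest paired else some idx

-- inner 'for j in range(1, n): … else: return res' (none = the inner break happened)
def innerA (s : List Int) (indices : PySem.Dict Int (List Int)) (k : Int) :
    List Int → List Bool → List Int → Option (List Int)
  | [], _, res => some res
  | j :: js, paired, res =>
    if pvGetB paired j then innerA s indices k js paired res
    else
      match firstUnpaired (indices.getD (pvIdx s j + 2 * k) []) paired with
      | none => none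
      | some idx =>
        innerA s indices k js (PySem.List.pySetD (PySem.List.pySetD paired j true) idx true)
          (res ++ [pvIdx s j + k])

-- outer 'for i in range(1, n)' with the early return
def outerA (s : List Int) (n : Int) (indices : PySem.Dict Int (List Int)) :
    List Int → List Int
  | [] => []
  | i :: is =>
    if pvIdx s i = pvIdx s 0 ∨ PySem.Int.mod (pvIdx s i - pvIdx s 0) 2 ≠ 0 then
      -- '(… & 1) != 0' is exactly '(…) % 2 != 0' on Python ints
      outerA s n indices is
    else
      -- '… >> 1' is exactly floor division by 2 on Python ints
      let k := PySem.Int.floordiv (pvIdx s i - pvIdx s 0) 2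
      let paired := PySem.List.pySetD (PySem.List.pySetD (List.replicate n.toNat false) 0 true) i true
      match innerA s indices k (PySem.List.pyRange 1 n) paired [pvIdx s 0 + k] with
      | some res => res
      | none => outerA s n indices is

def recoverArray (nums : List Int) : List Int :=
  let s := PySem.List.sorted nums (fun x => x)
  let n : Int := (s.length : Int)
  outerA s n (buildIndices s) (PySem.List.pyRange 1 n)

-- ===== PORT B =====

-- a successful list.remove shortens the list (termination of B's while loop)
theorem pvRemoveLen {t t' : List Int} {v : Int}
    (h : PySem.List.remove? t v = some t') : t'.length ≤ t.length := by
  have hv : v ∈ t := by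
    by_contra hv
    rw [(PySem.List.remove?_eq_none_iff t v).2 hv] at h
    cases h
  rw [PySem.List.remove?_eq_some_erase t v hv] at h
  cases h
  simp [hv]

-- 'while rest: a = rest.pop(0); rest.remove(a + d) (ValueError → fail); res.append(a + k)'
def matchB (d k : Int) : List Int → List Int → Option (List Int)
  | [], res => some res
  | a :: t, res =>
    match h : PySem.List.remove? t (a + d) with
    | none => none
    | some t' => matchB d k t' (res ++ [a + k])
termination_by rest _ => rest.length
decreasing_by have := pvRemoveLen h; simp; omega

-- 'for x in nums[1:]' with the early return
def outerB (base : Int) (s : List Int) : List Int → List Int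
  | [] => []
  | x :: xs =>
    let d := x - base
    if d ≤ 0 ∨ PySem.Int.mod d 2 ≠ 0 then outerB base s xs
    else
      match matchB d (PySem.Int.floordiv d 2) s [] with
      | some res => res
      | none => outerB base s xs

def recoverArray_alt (nums : List Int) : List Int :=
  let s := PySem.List.sorted nums (fun x => x)
  match s with
  | [] => []
  | base :: _ => outerB base s (PySem.List.slice s (some 1) none)

-- ===== PRECONDITION & SPEC =====
def Spec_recoverArray (nums : List Int) (out : List Int) : Prop := out = recoverArray_alt nums
instance (nums : List Int) (out : List Int) : Decidable (Spec_recoverArray nums out) := by unfold Spec_recoverArray; infer_instance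

-- ===== CLAIM (what is proved, stated in full; the proofs are below) =====
def Claim_equal_recoverArray : Prop := ∀ (nums : List Int), Dom_recoverArray nums → Spec_recoverArray nums (recoverArray nums)

-- ===== LEMMAS AND PROOFS =====

def pl : Int → List Int → Int → List Int
  | _, [], _ => []
  | i, x :: xs, v => if x = v then i :: pl (i + 1) xs v else pl (i + 1) xs v

def unp : List Int → List Bool → List Int
  | [], _ => []
  | _ :: _, [] => []
  | x :: xs, b :: bs => if b then unp xs bs else x :: unp xs bs

theorem pl_shift (xs : List Int) (v : Int) : ∀ (i c : Int),
    pl (i + c) xs v = (pl i xs v).map (· + c) := by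
  induction xs with
  | nil => intro i c; simp [pl]
  | cons x xs ih =>
    intro i c
    by_cases hx : x = v <;> simp [pl, hx] <;>
      · have h : i + c + 1 = (i + 1) + c := by ring
        rw [h, ih]

theorem pl_cons (x : Int) (xs : List Int) (v : Int) :
    pl 0 (x :: xs) v = (if x = v then [(0 : Int)] else []) ++ (pl 0 xs v).map (· + 1) := by
  have h : (1 : Int) = 0 + 1 := by ring
  by_cases hx : x = v <;> simp [pl, hx] <;> rw [h, pl_shift] <;> simp

theorem pl_nonneg (v : Int) : ∀ (xs : List Int) (i p : Int), p ∈ pl i xs v → i ≤ p := by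
  intro xs
  induction xs with
  | nil => intro i p h; simp [pl] at h
  | cons x xs ih =>
    intro i p h
    by_cases hx : x = v <;> simp [pl, hx] at h
    · rcases h with h | h
      · omega
      · have := ih (i+1) p h; omega
    · have := ih (i+1) p h; omega

theorem pl_val (v : Int) : ∀ (xs : List Int) (p : Int), p ∈ pl 0 xs v →
    0 ≤ p ∧ p.toNat < xs.length ∧ xs.getD p.toNat 0 = v := by
  intro xs
  induction xs with
  | nil => intro p h; simp [pl] at h
  | cons x xs ih =>
    intro p h
    rw [pl_cons] at h
    by_cases hx : x = v <;> simp [hx] at h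
    · rcases h with h | ⟨q, hq, hpq⟩
      · subst h; simpa using hx
      · have h0 := pl_nonneg v xs 0 q hq
        have := ih q hq
        have hp : p.toNat = q.toNat + 1 := by omega
        refine ⟨by omega, by simp [hp]; omega, by simp [hp]; tauto⟩
    · rcases h with ⟨q, hq, hpq⟩
      have h0 := pl_nonneg v xs 0 q hq
      have := ih q hq
      have hp : p.toNat = q.toNat + 1 := by omega
      refine ⟨by omega, by simp [hp]; omega, by simp [hp]; tauto⟩

theorem gb_succ (b : Bool) (bs : List Bool) {p : Int} (hp : 0 ≤ p) :
    pvGetB (b :: bs) (p + 1) = pvGetB bs p := by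
  have h1 : (p + 1).toNat = p.toNat + 1 := by omega
  rw [pvGetB, pvGetB, PySem.List.pyGet?_of_nonneg _ (by omega), PySem.List.pyGet?_of_nonneg _ hp, h1]
  simp

theorem fu_map (b : Bool) (bs : List Bool) : ∀ (l : List Int), (∀ p ∈ l, 0 ≤ p) →
    firstUnpaired (l.map (· + 1)) (b :: bs) = (firstUnpaired l bs).map (· + 1) := by
  intro l
  induction l with
  | nil => intro _; simp [firstUnpaired]
  | cons p l ih =>
    intro h
    have hp : (0:Int) ≤ p := h p (by simp)
    simp only [List.map_cons, firstUnpaired, gb_succ b bs hp]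
    by_cases hb : pvGetB bs p <;> simp [hb]
    exact ih (fun q hq => h q (by simp [hq]))

theorem fu_congr (pr pr' : List Bool) : ∀ (l : List Int),
    (∀ p ∈ l, pvGetB pr p = pvGetB pr' p) →
    firstUnpaired l pr = firstUnpaired l pr' := by
  intro l
  induction l with
  | nil => intro _; simp [firstUnpaired]
  | cons p l ih =>
    intro h
    simp only [firstUnpaired, h p (by simp)]
    by_cases hb : pvGetB pr' p <;> simp [hb]
    exact ih (fun q hq => h q (by simp [hq]))

theorem fu_none_iff (v : Int) : ∀ (s : List Int) (paired : List Bool),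
    paired.length = s.length →
    (firstUnpaired (pl 0 s v) paired = none ↔ v ∉ unp s paired) := by
  intro s
  induction s with
  | nil => intro paired _; simp [pl, unp, firstUnpaired]
  | cons x xs ih =>
    intro paired hlen
    cases paired with
    | nil => simp at hlen
    | cons b bs =>
      have hlen' : bs.length = xs.length := by simpa using hlen
      have hb0 : pvGetB (b :: bs) 0 = b := by simp [pvGetB]
      have hnn : ∀ p ∈ pl 0 xs v, (0:Int) ≤ p := fun p hp => pl_nonneg v xs 0 p hp
      rw [pl_cons]
      by_cases hx : x = v <;> cases b <;>
        simp [hx, firstUnpaired, hb0, fu_map _ _ _ hnn, unp, ih bs hlen']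
      intro _ h
      exact hx h.symm

theorem fu_some_remove (v : Int) : ∀ (s : List Int) (paired : List Bool) (idx : Int),
    paired.length = s.length →
    firstUnpaired (pl 0 s v) paired = some idx →
    0 ≤ idx ∧
      PySem.List.remove? (unp s paired) v = some (unp s (paired.set idx.toNat true)) := by
  intro s
  induction s with
  | nil => intro paired idx _ h; simp [pl, firstUnpaired] at h
  | cons x xs ih =>
    intro paired idx hlen h
    cases paired with
    | nil => simp at hlen
    | cons b bs =>
      have hlen' : bs.length = xs.length := by simpa using hlen
      have hb0 : pvGetB (b :: bs) 0 = b := by simp [pvGetB]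
      have hnn : ∀ p ∈ pl 0 xs v, (0:Int) ≤ p := fun p hp => pl_nonneg v xs 0 p hp
      rw [pl_cons] at h
      by_cases hx : x = v
      · cases b with
        | false =>
          simp [hx, firstUnpaired, hb0] at h
          subst h
          refine ⟨le_refl 0, ?_⟩
          simp [unp, hx, PySem.List.remove?_cons_self]
        | true =>
          simp only [hx, if_pos rfl, List.singleton_append, firstUnpaired, hb0, if_true,
            fu_map _ _ _ hnn] at h
          rcases Option.map_eq_some_iff.1 h with ⟨idx', hidx', rfl⟩
          obtain ⟨h0, hrem⟩ := ih bs idx' hlen' hidx'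
          have ht : (idx' + 1).toNat = idx'.toNat + 1 := by omega
          refine ⟨by omega, ?_⟩
          simpa [unp, ht] using hrem
      · have h' : firstUnpaired ((pl 0 xs v).map (· + 1)) (b :: bs) = some idx := by
          simpa [hx] using h
        rw [fu_map _ _ _ hnn] at h'
        rcases Option.map_eq_some_iff.1 h' with ⟨idx', hidx', rfl⟩
        obtain ⟨h0, hrem⟩ := ih bs idx' hlen' hidx'
        have ht : (idx' + 1).toNat = idx'.toNat + 1 := by omega
        refine ⟨by omega, ?_⟩
        cases b with
        | true => simpa [unp, ht] using hrem
        | false =>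
          rw [ht]
          show PySem.List.remove? (x :: unp xs bs) v = some (x :: unp xs (bs.set idx'.toNat true))
          rw [PySem.List.remove?_cons_of_ne _ hx, hrem]
          rfl

theorem unp_nil_of_all : ∀ (s : List Int) (paired : List Bool),
    paired.length = s.length → (∀ p, p < s.length → paired.getD p false = true) →
    unp s paired = [] := by
  intro s
  induction s with
  | nil => intro paired _ _; simp [unp]
  | cons x xs ih =>
    intro paired hlen hall
    cases paired with
    | nil => simp at hlen
    | cons b bs =>
      have hb : b = true := by simpa using hall 0 (by simp)
      subst hb
      simp only [unp, if_true]
      exact ih bs (by simpa using hlen) (fun p hp => by simpa using hall (p+1) (by simpa using hp))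

theorem unp_head : ∀ (j : Nat) (s : List Int) (paired : List Bool),
    paired.length = s.length → (∀ p, p < j → paired.getD p false = true) →
    j < s.length → paired.getD j false = false →
    unp s paired = s.getD j 0 :: unp s (paired.set j true) := by
  intro j
  induction j with
  | zero =>
    intro s paired hlen _ hj hb
    cases s with
    | nil => simp at hj
    | cons x xs =>
      cases paired with
      | nil => simp at hlen
      | cons b bs =>
        have hb' : b = false := by simpa using hb
        subst hb'
        simp [unp]
  | succ j ih =>
    intro s paired hlen hall hj hb
    cases s with
    | nil => simp at hj
    | cons x xs =>
      cases paired with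
      | nil => simp at hlen
      | cons b bs =>
        have hb0 : b = true := by simpa using hall 0 (by omega)
        subst hb0
        simp only [unp, if_true, List.set_cons_succ, List.getD_cons_succ]
        exact ih xs bs (by simpa using hlen)
          (fun p hp => by simpa using hall (p+1) (by omega)) (by simpa using hj) (by simpa using hb)

theorem getD_set_true_of (l : List Bool) (q p : Nat) (h : l.getD p false = true) :
    (l.set q true).getD p false = true := by
  have hp : p < l.length := by
    by_contra hp
    rw [List.getD_eq_getElem?_getD, List.getElem?_eq_none (by omega)] at h
    simp at h
  by_cases hqp : q = p
  · subst hqp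
    simp [List.getD_eq_getElem?_getD, List.getElem?_set_self, hp]
  · simp [List.getD_eq_getElem?_getD, List.getElem?_set_ne hqp] at h ⊢
    exact h

theorem getD_set_true_self (l : List Bool) (q : Nat) (h : q < l.length) :
    (l.set q true).getD q false = true := by
  simp [List.getD_eq_getElem?_getD, h]

theorem gb_set_ne (l : List Bool) (q : Nat) {p : Int} (hp : 0 ≤ p) (hne : p.toNat ≠ q) :
    pvGetB (l.set q true) p = pvGetB l p := by
  rw [pvGetB, pvGetB, PySem.List.pyGet?_of_nonneg _ hp, PySem.List.pyGet?_of_nonneg _ hp,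
    List.getElem?_set_ne (fun h => hne h.symm)]

theorem gb_nat (l : List Bool) (n : Nat) : pvGetB l (n : Int) = l.getD n false := by
  simp [pvGetB, PySem.List.pyGet?_natCast, List.getD_eq_getElem?_getD]

theorem pvIdx_nat (l : List Int) (n : Nat) : pvIdx l (n : Int) = l.getD n 0 := by
  simp [pvIdx, PySem.List.pyGet?_natCast, List.getD_eq_getElem?_getD]

theorem enum_filter_pl (v : Int) : ∀ (s : List Int) (i : Int),
    ((PySem.List.enumerate s i).filter (fun p => p.2 == v)).map (fun p => p.1) = pl i s v := by
  intro s
  induction s with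
  | nil => intro i; simp [PySem.List.enumerate, pl]
  | cons x xs ih =>
    intro i
    by_cases hx : x = v <;> simp [PySem.List.enumerate, pl, hx, ih]

theorem buildIndices_getD (s : List Int) (v : Int) :
    (buildIndices s).getD v [] = pl 0 s v := by
  unfold buildIndices
  have h1 : (PySem.List.enumerate s 0).foldl
      (fun d p => d.modify p.2 [] (fun l => l ++ [p.1])) PySem.Dict.empty
      = ((PySem.List.enumerate s 0).map (fun p => (p.2, p.1))).foldl
        (fun d q => d.modify q.1 [] (fun l => l ++ [q.2])) PySem.Dict.empty := by
    rw [List.foldl_map]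
  rw [h1, PySem.Dict.getD_foldl_modify_append]
  rw [List.filter_map, List.map_map]
  simp only [Function.comp_def]
  rw [← enum_filter_pl v s 0]
  rfl

theorem unp_replicate_false : ∀ (t : List Int), unp t (List.replicate t.length false) = t := by
  intro t
  induction t with
  | nil => simp [unp]
  | cons x xs ih => simpa [unp, List.replicate_succ] using ih

theorem unp_set_replicate : ∀ (t : List Int) (q : Nat),
    unp t ((List.replicate t.length false).set q true) = t.eraseIdx q := by
  intro t
  induction t with
  | nil => intro q; simp [unp]
  | cons x xs ih =>
    intro q
    cases q with
    | zero => simp [unp, List.replicate_succ, unp_replicate_false]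
    | succ q => simpa [unp, List.replicate_succ] using ih q

theorem cons_eraseIdx_sorted : ∀ (t : List Int), t.Pairwise (· ≤ ·) →
    ∀ q, q < t.length → ∀ x, t.getD q 0 = x → (∀ y ∈ t, x ≤ y) →
    x :: t.eraseIdx q = t := by
  intro t
  induction t with
  | nil => intro _ q hq; simp at hq
  | cons y tt ih =>
    intro hp q hq x hx hlb
    have hyt : ∀ z ∈ tt, y ≤ z := fun z hz => (List.pairwise_cons.1 hp).1 z hz
    have hxy : x = y := by
      have h1 : x ≤ y := hlb y (by simp)
      cases q with
      | zero => simp at hx; omega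
      | succ q =>
        have hq' : q < tt.length := by simpa using hq
        have hg : tt.getD q 0 = tt[q] := by
          simp [List.getD_eq_getElem?_getD, List.getElem?_eq_getElem hq']
        have h2 : y ≤ x := by
          have := hyt tt[q] (List.getElem_mem hq')
          simp only [List.getD_cons_succ] at hx
          omega
        omega
    subst hxy
    cases q with
    | zero => simp
    | succ q =>
      simp only [List.eraseIdx_cons_succ]
      have htt : x :: tt.eraseIdx q = tt := by
        apply ih (List.pairwise_cons.1 hp).2 q (by simpa using hq) x (by simpa using hx)
        intro z hz
        exact hyt z hz
      rw [htt]

theorem eraseIdx_eq_erase_sorted : ∀ (t : List Int), t.Pairwise (· ≤ ·) →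
    ∀ q, q < t.length → t.eraseIdx q = t.erase (t.getD q 0) := by
  intro t
  induction t with
  | nil => intro _ q hq; simp at hq
  | cons y tt ih =>
    intro hp q hq
    cases q with
    | zero => simp
    | succ q =>
      have hq' : q < tt.length := by simpa using hq
      simp only [List.eraseIdx_cons_succ, List.getD_cons_succ]
      by_cases hy : y = tt.getD q 0
      · rw [← hy, List.erase_cons_head]
        exact (cons_eraseIdx_sorted tt (List.pairwise_cons.1 hp).2 q hq' y hy.symm
          (fun z hz => (List.pairwise_cons.1 hp).1 z hz)).symm ▸ rfl
      · rw [List.erase_cons_tail (by simpa using hy)]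
        rw [ih (List.pairwise_cons.1 hp).2 q hq']

theorem inner_eq (s : List Int) (d k : Int) (hd : d = 2 * k) (hk : d ≠ 0) :
    ∀ (m j : Nat) (paired : List Bool) (res : List Int), s.length - j = m →
    paired.length = s.length →
    (∀ p, p < j → paired.getD p false = true) →
    innerA s (buildIndices s) k (PySem.List.pyRange (j : Int) (s.length : Int)) paired res
      = matchB d k (unp s paired) res := by
  intro m
  induction m with
  | zero =>
    intro j paired res hm hlen hall
    have hj : s.length ≤ j := by omega
    rw [PySem.List.pyRange_one_eq_nil (by exact_mod_cast hj)]
    rw [unp_nil_of_all s paired hlen (fun p hp => hall p (by omega))]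
    simp [innerA, matchB]
  | succ m ih =>
    intro j paired res hm hlen hall
    have hj : j < s.length := by omega
    rw [PySem.List.pyRange_one_cons (by exact_mod_cast hj)]
    have hcast : ((j : Int) + 1) = ((j + 1 : Nat) : Int) := by push_cast; ring
    by_cases hb : paired.getD j false = true
    · have hgb : pvGetB paired (j : Int) = true := by rw [gb_nat]; exact hb
      simp only [innerA, hgb, if_true]
      rw [hcast]
      refine ih (j+1) paired res (by omega) hlen (fun p hp => ?_)
      rcases Nat.lt_succ_iff_lt_or_eq.1 hp with h | h
      · exact hall p h
      · subst h; exact hb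
    · have hbf : paired.getD j false = false := by simpa using hb
      have hgb : pvGetB paired (j : Int) = false := by rw [gb_nat]; exact hbf
      have hunp : unp s paired = s.getD j 0 :: unp s (paired.set j true) :=
        unp_head j s paired hlen (fun p hp => hall p hp) hj hbf
      have hidx : pvIdx s (j:Int) = s.getD j 0 := pvIdx_nat s j
      have hbi : (buildIndices s).getD (pvIdx s (j:Int) + 2 * k) [] = pl 0 s (s.getD j 0 + d) := by
        rw [hidx, ← hd, buildIndices_getD]
      have hlenJ : (paired.set j true).length = s.length := by simp [hlen]
      have hne_val : ∀ p ∈ pl 0 s (s.getD j 0 + d), pvGetB paired p = pvGetB (paired.set j true) p := by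
        intro p hp
        obtain ⟨h0, hlt, hval⟩ := pl_val (s.getD j 0 + d) s p hp
        have hpj' : p.toNat ≠ j := by
          intro hEq
          rw [hEq] at hval
          omega
        rw [gb_set_ne paired j h0 hpj']
      have hfu : firstUnpaired (pl 0 s (s.getD j 0 + d)) paired
          = firstUnpaired (pl 0 s (s.getD j 0 + d)) (paired.set j true) :=
        fu_congr _ _ _ hne_val
      simp only [innerA, hgb, Bool.false_eq_true, if_false, hbi, hfu]
      rw [hunp]
      cases hres : firstUnpaired (pl 0 s (s.getD j 0 + d)) (paired.set j true) with
      | none =>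
        have hnot : (s.getD j 0 + d) ∉ unp s (paired.set j true) :=
          (fu_none_iff _ s _ hlenJ).1 hres
        have hrm : PySem.List.remove? (unp s (paired.set j true)) (s.getD j 0 + d) = none :=
          (PySem.List.remove?_eq_none_iff _ _).2 hnot
        rw [matchB, hrm]
      | some idx =>
        obtain ⟨h0, hrm⟩ := fu_some_remove (s.getD j 0 + d) s (paired.set j true) idx hlenJ hres
        rw [matchB, hrm]
        have hset1 : PySem.List.pySetD paired (j : Int) true = paired.set j true := by
          simp [PySem.List.pySetD_natCast]
        have hset2 : PySem.List.pySetD (paired.set j true) idx true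
            = (paired.set j true).set idx.toNat true := by
          rw [PySem.List.pySetD_of_nonneg _ _ h0]
        simp only [hset1, hset2, hidx, hcast]
        refine ih (j+1) _ _ (by omega) (by simp [hlen]) (fun p hp => ?_)
        rcases Nat.lt_succ_iff_lt_or_eq.1 hp with h | h
        · exact getD_set_true_of _ _ _ (getD_set_true_of _ _ _ (hall p h))
        · rw [h]
          exact getD_set_true_of _ _ _ (getD_set_true_self paired j (by omega))

theorem outer_eq (s : List Int) (base : Int) (tail : List Int) (hs : s = base :: tail)
    (hsort : s.Pairwise (· ≤ ·)) :
    ∀ (l : List Int) (j : Nat), 1 ≤ j → s.drop j = l →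
    outerA s (s.length : Int) (buildIndices s) (PySem.List.pyRange (j : Int) (s.length : Int))
      = outerB base s l := by
  intro l
  induction l with
  | nil =>
    intro j hj1 hdrop
    have hlen : s.length ≤ j := List.drop_eq_nil_iff.1 hdrop
    rw [PySem.List.pyRange_one_eq_nil (by exact_mod_cast hlen)]
    simp [outerA, outerB]
  | cons x l' ih =>
    intro j hj1 hdrop
    have hjlen : j < s.length := by
      by_contra h
      rw [List.drop_eq_nil_iff.2 (by omega)] at hdrop
      cases hdrop
    have hcd : s[j] :: s.drop (j+1) = x :: l' := by
      rw [List.getElem_cons_drop]; exact hdrop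
    have hxj : s[j] = x := by injection hcd
    have hdrop' : s.drop (j+1) = l' := by injection hcd
    have hgd : s.getD j 0 = x := by
      rw [List.getD_eq_getElem?_getD, List.getElem?_eq_getElem hjlen, hxj]; rfl
    have hidxj : pvIdx s (j : Int) = x := by rw [pvIdx_nat, hgd]
    have hidx0 : pvIdx s 0 = base := by
      rw [hs]; simp [pvIdx]
    have hxs : x ∈ s := by
      have : x ∈ s.drop j := by rw [hdrop]; simp
      exact List.mem_of_mem_drop this
    have hbase_le : base ≤ x := by
      rcases List.mem_cons.1 (hs ▸ hxs) with h | h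
      · omega
      · exact (List.pairwise_cons.1 (hs ▸ hsort)).1 x h
    rw [PySem.List.pyRange_one_cons (by exact_mod_cast hjlen)]
    have hcast : ((j : Int) + 1) = ((j + 1 : Nat) : Int) := by push_cast; ring
    simp only [outerA, outerB, hidxj, hidx0]
    have hiff : (x = base ∨ PySem.Int.mod (x - base) 2 ≠ 0)
        ↔ (x - base ≤ 0 ∨ PySem.Int.mod (x - base) 2 ≠ 0) := by
      constructor <;> rintro (h | h)
      · left; omega
      · right; exact h
      · left; omega
      · right; exact h
    by_cases hcond : x - base ≤ 0 ∨ PySem.Int.mod (x - base) 2 ≠ 0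
    · rw [if_pos (hiff.2 hcond), if_pos hcond, hcast]
      exact ih (j+1) (by omega) hdrop'
    · rw [if_neg (fun h => hcond (hiff.1 h)), if_neg hcond]
      have hdpos : 0 < x - base := by
        rcases not_or.1 hcond with ⟨h1, _⟩
        omega
      have hd2 : PySem.Int.mod (x - base) 2 = 0 := by
        rcases not_or.1 hcond with ⟨_, h2⟩
        simpa using h2
      set d := x - base with hd_def
      set k := PySem.Int.floordiv d 2 with hk_def
      have hkdiv : k = d / 2 := by rw [hk_def, PySem.Int.floordiv_eq_ediv_of_pos (by omega)]
      have hmod : d % 2 = 0 := by rw [← PySem.Int.mod_eq_emod_of_pos (by omega)]; exact hd2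
      have hd2k : d = 2 * k := by omega
      have hdne : d ≠ 0 := by omega
      cases j with
      | zero => omega
      | succ jj =>
        have hjj : jj < tail.length := by
          rw [hs] at hjlen; simpa using hjlen
        have hpaired : PySem.List.pySetD (PySem.List.pySetD
            (List.replicate ((s.length : Int)).toNat false) 0 true) ((jj+1 : Nat) : Int) true
            = true :: (List.replicate tail.length false).set jj true := by
          rw [PySem.List.pySetD_natCast,
            PySem.List.pySetD_of_nonneg _ _ (by norm_num : (0:Int) ≤ 0)]
          rw [hs]
          simp [List.replicate_succ]
        have hinner := inner_eq s d k hd2k hdne (s.length - 1) 1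
          (true :: (List.replicate tail.length false).set jj true) [base + k]
          (by omega)
          (by rw [hs]; simp)
          (by intro p hp; have hp0 : p = 0 := by omega
              subst hp0; simp)
        have hunp0 : unp s (true :: (List.replicate tail.length false).set jj true)
            = tail.erase x := by
          rw [hs]
          show unp tail ((List.replicate tail.length false).set jj true) = tail.erase x
          rw [unp_set_replicate tail jj]
          rw [eraseIdx_eq_erase_sorted tail (List.pairwise_cons.1 (hs ▸ hsort)).2 jj hjj]
          congr 1
          have hgd' : s.getD (jj+1) 0 = tail.getD jj 0 := by rw [hs]; simp
          omega
        have hmB : matchB d k s [] = matchB d k (tail.erase x) [base + k] := by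
          rw [hs, matchB]
          have hxt : x ∈ tail := by
            rcases List.mem_cons.1 (hs ▸ hxs) with h | h
            · omega
            · exact h
          have hbd : base + d = x := by omega
          rw [hbd, PySem.List.remove?_eq_some_erase tail x hxt]
          simp
        rw [hpaired, hmB]
        rw [hunp0] at hinner
        simp only [Nat.cast_one] at hinner
        rw [hinner]
        cases hM : matchB d k (tail.erase x) [base + k] with
        | some r => rfl
        | none =>
          rw [hcast]
          exact ih (jj + 1 + 1) (by omega) hdrop'

theorem recoverArray_eq_alt (nums : List Int) : recoverArray nums = recoverArray_alt nums := by
  rw [recoverArray, recoverArray_alt]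
  have hsort : (PySem.List.sorted nums (fun x => x)).Pairwise (· ≤ ·) := by
    simpa using PySem.List.sorted_pairwise nums (fun x => x)
  generalize hsg : PySem.List.sorted nums (fun x => x) = s at *
  cases s with
  | nil =>
    show outerA [] ((List.length ([] : List Int) : Int)) (buildIndices [])
      (PySem.List.pyRange 1 ((List.length ([] : List Int) : Int))) = []
    rw [PySem.List.pyRange_one_eq_nil (by norm_num)]
    rfl
  | cons base tail =>
    show outerA (base :: tail) ((base :: tail).length : Int) (buildIndices (base :: tail))
        (PySem.List.pyRange 1 ((base :: tail).length : Int))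
      = outerB base (base :: tail) (PySem.List.slice (base :: tail) (some 1) none)
    rw [PySem.List.slice_from_one]
    have h := outer_eq (base :: tail) base tail rfl hsort tail 1 (by omega) (by simp)
    simpa using h

-- ===== VERDICT (by name: the statement is the Claim_ definition above) =====
theorem recoverArray_spec : Claim_equal_recoverArray := by
  unfold Claim_equal_recoverArray
  intro nums _
  unfold Spec_recoverArray
  exact recoverArray_eq_alt nums
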